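-- pv_equiv track=rewrite | github.com/Seven3x/DeckPlanner | src/slay2_ai/planner.py | _distinct_choice_tuples
-- ===== SOURCE A (Python) =====
-- from itertools import combinations
--
-- def _distinct_choice_tuples(pool: list[str], count: int) -> list[tuple[str, ...]]:
--     actual_count = min(count, len(pool))
--     if actual_count == 0:
--         return [()]
--
--     choices = {
--         tuple(pool[i] for i in idxs)
--         for idxs in combinations(range(len(pool)), actual_count)
--     }
--     return sorted(choices)
-- ===== SOURCE B (Python) =====
-- def _distinct_choice_tuples(pool, count):
--     k = min(count, len(pool))
--     if k == 0:
--         return [()]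
--
--     def gen(suffix, need, prefix):
--         # each distinct length-`need` subsequence of `suffix` is produced exactly once:
--         # at every level only the FIRST occurrence of each value is extended
--         if need == 0:
--             return [prefix]
--         out = []
--         seen = set()
--         rest = suffix
--         while rest:
--             v, rest = rest[0], rest[1:]
--             if v not in seen:
--                 seen.add(v)
--                 out.extend(gen(rest, need - 1, prefix + (v,)))
--         return out
--
--     out = gen(pool, k, ())
--     out.sort()
--     return out
-- ===== Notes on version B (the rewrite author's own statement) =====
-- stated objective: alternative
-- what changed: B enumerates each distinct length-k value-tuple exactly once by a first-occurrence recursion over the remaining suffix (no index combinations and no set-based deduplication), then sorts the already-duplicate-free list.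
import Mathlib
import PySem

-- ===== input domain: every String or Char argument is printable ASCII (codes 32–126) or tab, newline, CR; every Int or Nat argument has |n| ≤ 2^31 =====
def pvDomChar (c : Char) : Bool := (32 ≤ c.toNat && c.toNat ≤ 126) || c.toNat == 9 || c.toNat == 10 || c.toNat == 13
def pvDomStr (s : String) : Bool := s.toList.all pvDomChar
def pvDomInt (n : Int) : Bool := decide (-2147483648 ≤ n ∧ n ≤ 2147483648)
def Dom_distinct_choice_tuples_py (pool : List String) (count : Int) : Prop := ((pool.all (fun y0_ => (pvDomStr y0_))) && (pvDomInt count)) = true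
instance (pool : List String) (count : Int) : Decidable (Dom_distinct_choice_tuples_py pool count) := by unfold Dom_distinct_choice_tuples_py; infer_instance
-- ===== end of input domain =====

-- B replaces A's "all index combinations, dedup via a set, sort" by a first-occurrence
-- recursion that emits each distinct tuple exactly once, then sorts (objective: alternative).

-- ===== PORT A =====
-- itertools.combinations(xs, k), lexicographic by position
def combosA {α : Type} : Nat → List α → List (List α)
  | 0, _ => [[]]
  | _ + 1, [] => []
  | k + 1, x :: xs => (combosA k xs).map (fun t => x :: t) ++ combosA (k + 1) xs

def distinct_choice_tuples_py (pool : List String) (count : Int) : List (List String) :=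
  let actual := min count (pool.length : Int)
  if actual == 0 then [[]]
  else
    let choices := PySem.Set.ofList
      ((combosA actual.toNat (List.range pool.length)).map
        (fun idxs => idxs.map (fun i => pool.getD i "")))
    PySem.List.sorted choices (fun x => x) false

-- ===== PORT B =====
-- the while-loop of Source B's gen, carrying `seen` and the remaining `rest`;
-- the recursive call gen(rest, need-1, prefix+(v,)) is inlined (its `need == 0` test first)
-- so that the recursion is structural on the list
def genLoop (need : Int) (pre : List String) : List String → PySem.Set String → List (List String)
  | [], _ => []
  | v :: rest, seen =>
    if PySem.Set.contains seen v then genLoop need pre rest seen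
    else
      (if need - 1 == 0 then [pre ++ [v]]
       else genLoop (need - 1) (pre ++ [v]) rest PySem.Set.empty)
      ++ genLoop need pre rest (PySem.Set.add seen v)

-- gen(suffix, need, prefix) of Source B
def genB (suffix : List String) (need : Int) (pre : List String) : List (List String) :=
  if need == 0 then [pre] else genLoop need pre suffix PySem.Set.empty

def distinct_choice_tuples_py_alt (pool : List String) (count : Int) : List (List String) :=
  let k := min count (pool.length : Int)
  if k == 0 then [[]]
  else
    let out := genB pool k []
    PySem.List.sorted out (fun x => x) false

-- ===== PRECONDITION & SPEC =====
-- Pre_ excludes count < 0, on which A raises ValueError (combinations rejects negative r).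
def Pre_distinct_choice_tuples_py (pool : List String) (count : Int) : Prop := 0 ≤ count
instance (pool : List String) (count : Int) : Decidable (Pre_distinct_choice_tuples_py pool count) := by
  unfold Pre_distinct_choice_tuples_py; infer_instance
def pvWitness_distinct_choice_tuples_py : List String × Int := (["a", "b", "a"], 2)


def Spec_distinct_choice_tuples_py (pool : List String) (count : Int) (out : List (List String)) : Prop := out = distinct_choice_tuples_py_alt pool count
instance (pool : List String) (count : Int) (out : List (List String)) : Decidable (Spec_distinct_choice_tuples_py pool count out) := by unfold Spec_distinct_choice_tuples_py; infer_instance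

-- ===== CLAIM (what is proved, stated in full; the proofs are below) =====
def Claim_equal_distinct_choice_tuples_py : Prop := ∀ (pool : List String) (count : Int), Dom_distinct_choice_tuples_py pool count → Pre_distinct_choice_tuples_py pool count → Spec_distinct_choice_tuples_py pool count (distinct_choice_tuples_py pool count)

-- ===== LEMMAS AND PROOFS =====

lemma combosA_map {α β : Type} (f : α → β) : ∀ (xs : List α) (k : Nat),
    (combosA k xs).map (List.map f) = combosA k (xs.map f) := by
  intro xs
  induction xs with
  | nil => intro k; cases k <;> simp [combosA]
  | cons x xs ih =>
    intro k
    cases k with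
    | zero => simp [combosA]
    | succ k =>
      simp [combosA, ← ih, List.map_map, Function.comp]

lemma range_map_getD (xs : List String) :
    (List.range xs.length).map (fun i => xs.getD i "") = xs := by
  apply List.ext_getElem
  · simp
  · intro i h1 h2
    simp only [List.getElem_map, List.getElem_range, List.getD_eq_getElem?_getD]
    simp at h1
    rw [List.getElem?_eq_getElem h2]
    rfl

lemma mem_combosA {α : Type} : ∀ (xs : List α) (k : Nat) (l : List α),
    l ∈ combosA k xs ↔ l.Sublist xs ∧ l.length = k := by
  intro xs
  induction xs with
  | nil =>
    intro k l
    cases k with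
    | zero =>
      simp only [combosA, List.mem_singleton]
      constructor
      · rintro rfl; simp
      · rintro ⟨h1, _⟩; simpa using List.sublist_nil.mp h1
    | succ k =>
      simp only [combosA]
      constructor
      · simp
      · rintro ⟨h1, h2⟩; rw [List.sublist_nil.mp h1] at h2; simp at h2
  | cons x xs ih =>
    intro k l
    cases k with
    | zero =>
      simp only [combosA, List.mem_singleton]
      constructor
      · rintro rfl; simp
      · rintro ⟨_, h2⟩; exact List.length_eq_zero_iff.mp h2
    | succ k =>
      simp only [combosA, List.mem_append, List.mem_map, ih]
      constructor
      · rintro (⟨t, ⟨hs, hl⟩, rfl⟩ | ⟨hs, hl⟩)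
        · exact ⟨List.cons_sublist_cons.mpr hs, by simp [hl]⟩
        · exact ⟨hs.trans (List.sublist_cons_self x xs), hl⟩
      · rintro ⟨hs, hl⟩
        rcases List.sublist_cons_iff.mp hs with h | ⟨r, rfl, hr⟩
        · exact Or.inr ⟨h, hl⟩
        · exact Or.inl ⟨r, ⟨hr, by simpa using hl⟩, rfl⟩

-- membership characterisation of the loop: it emits exactly the distinct continuations
lemma mem_genLoop : ∀ (ls : List String) (need : Int) (pre : List String)
    (seen : PySem.Set String) (l : List String), 1 ≤ need →
    (l ∈ genLoop need pre ls seen ↔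
      ∃ v t, l = pre ++ v :: t ∧ v ∉ seen ∧
        (v :: t).Sublist ls ∧ ((v :: t).length : Int) = need) := by
  intro ls
  induction ls with
  | nil => intro need pre seen l _; simp [genLoop]
  | cons v rest ih =>
    intro need pre seen l hneed
    rw [genLoop]
    by_cases hv : PySem.Set.contains seen v
    · rw [if_pos hv, ih need pre seen l hneed]
      have hvm : v ∈ seen := by simpa using hv
      constructor
      · rintro ⟨w, t, rfl, hw, hsub, hlen⟩
        exact ⟨w, t, rfl, hw, hsub.trans (List.sublist_cons_self v rest), hlen⟩
      · rintro ⟨w, t, rfl, hw, hsub, hlen⟩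
        refine ⟨w, t, rfl, hw, ?_, hlen⟩
        rcases List.sublist_cons_iff.mp hsub with h | ⟨r, he, hr⟩
        · exact h
        · rcases List.cons_eq_cons.mp he with ⟨rfl, rfl⟩
          exact absurd hvm hw
    · rw [if_neg hv, List.mem_append]
      have hvm : v ∉ seen := by simpa using hv
      have hfirst : (l ∈ if need - 1 == 0 then [pre ++ [v]]
            else genLoop (need - 1) (pre ++ [v]) rest PySem.Set.empty) ↔
          ∃ t, l = pre ++ v :: t ∧ t.Sublist rest ∧ (t.length : Int) = need - 1 := by
        by_cases h1 : need - 1 == 0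
        · rw [if_pos h1]
          simp only [beq_iff_eq] at h1
          simp only [List.mem_singleton]
          constructor
          · rintro rfl; exact ⟨[], by simp, by simp, by simp; omega⟩
          · rintro ⟨t, rfl, _, hlen⟩
            have : t = [] := List.length_eq_zero_iff.mp (by omega)
            simp [this]
        · rw [if_neg h1]
          simp only [beq_iff_eq] at h1
          rw [ih (need - 1) (pre ++ [v]) PySem.Set.empty l (by omega)]
          constructor
          · rintro ⟨w, t, rfl, _, hsub, hlen⟩
            exact ⟨w :: t, by simp, hsub, hlen⟩
          · rintro ⟨t, rfl, hsub, hlen⟩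
            match t with
            | [] => exfalso; simp at hlen; omega
            | w :: t =>
              exact ⟨w, t, by simp, by simp [PySem.Set.empty], hsub, hlen⟩
      rw [hfirst, ih need pre (PySem.Set.add seen v) l hneed]
      constructor
      · rintro (⟨t, rfl, hsub, hlen⟩ | ⟨w, t, rfl, hw, hsub, hlen⟩)
        · refine ⟨v, t, rfl, hvm, List.cons_sublist_cons.mpr hsub, ?_⟩
          simp at hlen ⊢; omega
        · rw [PySem.Set.mem_add] at hw
          push Not at hw
          exact ⟨w, t, rfl, hw.1, hsub.trans (List.sublist_cons_self v rest), hlen⟩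
      · rintro ⟨w, t, rfl, hw, hsub, hlen⟩
        rcases List.sublist_cons_iff.mp hsub with h | ⟨r, he, hr⟩
        · by_cases hwv : w = v
          · subst hwv
            exact Or.inl ⟨t, rfl, List.sublist_of_cons_sublist h, by simp at hlen; omega⟩
          · refine Or.inr ⟨w, t, rfl, ?_, h, hlen⟩
            rw [PySem.Set.mem_add]; push Not; exact ⟨hw, hwv⟩
        · rcases List.cons_eq_cons.mp he with ⟨rfl, rfl⟩
          exact Or.inl ⟨t, rfl, hr, by simp at hlen ⊢; omega⟩

lemma mem_genB (suffix : List String) (need : Int) (pre l : List String) (h : 0 ≤ need) :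
    l ∈ genB suffix need pre ↔
      ∃ t, l = pre ++ t ∧ t.Sublist suffix ∧ (t.length : Int) = need := by
  rw [genB]
  by_cases hz : need == 0
  · rw [if_pos hz]
    simp only [beq_iff_eq] at hz
    subst hz
    simp only [List.mem_singleton]
    constructor
    · rintro rfl; exact ⟨[], by simp⟩
    · rintro ⟨t, rfl, _, hlen⟩
      have : t = [] := List.length_eq_zero_iff.mp (by omega)
      simp [this]
  · rw [if_neg hz]
    simp only [beq_iff_eq] at hz
    rw [mem_genLoop suffix need pre PySem.Set.empty l (by omega)]
    constructor
    · rintro ⟨v, t, rfl, _, hsub, hlen⟩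
      exact ⟨v :: t, rfl, hsub, hlen⟩
    · rintro ⟨t, rfl, hsub, hlen⟩
      match t with
      | [] => exfalso; simp at hlen; omega
      | v :: t => exact ⟨v, t, rfl, by simp [PySem.Set.empty], hsub, hlen⟩

lemma nodup_genLoop : ∀ (ls : List String) (need : Int) (pre : List String)
    (seen : PySem.Set String), 1 ≤ need → (genLoop need pre ls seen).Nodup := by
  intro ls
  induction ls with
  | nil => intro _ _ _ _; simp [genLoop]
  | cons v rest ih =>
    intro need pre seen hneed
    rw [genLoop]
    by_cases hv : PySem.Set.contains seen v
    · rw [if_pos hv]; exact ih need pre seen hneed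
    · rw [if_neg hv]
      apply List.Nodup.append
      · by_cases h1 : need - 1 == 0
        · rw [if_pos h1]; simp
        · rw [if_neg h1]
          simp only [beq_iff_eq] at h1
          exact ih (need - 1) (pre ++ [v]) PySem.Set.empty (by omega)
      · exact ih need pre (PySem.Set.add seen v) hneed
      · intro l hl1 hl2
        rw [mem_genLoop rest need pre (PySem.Set.add seen v) l hneed] at hl2
        obtain ⟨w, t, rfl, hw, _, _⟩ := hl2
        rw [PySem.Set.mem_add] at hw
        push Not at hw
        by_cases h1 : need - 1 == 0
        · rw [if_pos h1] at hl1
          simp only [List.mem_singleton] at hl1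
          simp at hl1
          exact hw.2 hl1.1
        · rw [if_neg h1] at hl1
          simp only [beq_iff_eq] at h1
          rw [mem_genLoop rest (need - 1) (pre ++ [v]) PySem.Set.empty _ (by omega)] at hl1
          obtain ⟨u, s, he, _, _, _⟩ := hl1
          have h2 : w = v ∧ t = u :: s := by simpa using he
          exact hw.2 h2.1

lemma nodup_genB (suffix : List String) (need : Int) (pre : List String) (h : 0 ≤ need) :
    (genB suffix need pre).Nodup := by
  rw [genB]
  by_cases hz : need == 0
  · rw [if_pos hz]; simp
  · rw [if_neg hz]
    simp only [beq_iff_eq] at hz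
    exact nodup_genLoop suffix need pre PySem.Set.empty (by omega)

lemma sorted_bridge (xs : List (List String)) (key : List String → List String) :
    @PySem.List.sorted (List String) (List String) List.instLT (fun a b => a.decidableLT b) xs key false
      = @PySem.List.sorted (List String) (List String) List.instLinearOrder.toLT
          LinearOrder.toDecidableLT xs key false := by
  congr 1

-- ===== VERDICT (by name: the statement is the Claim_ definition above) =====
theorem distinct_choice_tuples_py_spec : Claim_equal_distinct_choice_tuples_py := by
  intro pool count _ hpre
  unfold Spec_distinct_choice_tuples_py
  unfold distinct_choice_tuples_py distinct_choice_tuples_py_alt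
  simp only []
  by_cases hz : min count (pool.length : Int) == 0
  · rw [if_pos hz, if_pos hz]
  · rw [if_neg hz, if_neg hz]
    have hk0 : (0 : Int) ≤ min count (pool.length : Int) := by
      unfold Pre_distinct_choice_tuples_py at hpre
      exact le_min hpre (Int.natCast_nonneg _)
    rw [sorted_bridge, sorted_bridge]
    apply PySem.List.sorted_eq_sorted_of_perm
    · exact fun a b h => h
    · rw [List.perm_ext_iff_of_nodup (PySem.Set.nodup_ofList _) (nodup_genB _ _ _ hk0)]
      intro l
      rw [PySem.Set.mem_ofList, mem_genB pool _ [] l hk0]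
      rw [combosA_map, range_map_getD]
      rw [mem_combosA]
      simp only [beq_iff_eq] at hz
      constructor
      · rintro ⟨hs, hl⟩
        exact ⟨l, by simp, hs, by rw [hl, Int.toNat_of_nonneg hk0]⟩
      · rintro ⟨t, rfl, hs, hl⟩
        exact ⟨hs, by omega⟩
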